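-- pv_equiv track=rewrite | github.com/mattwbdv/Python-Coursework | list_tools.py | max_from_2_tuples
-- ===== SOURCE A (Python) =====
-- def max_from_2_tuples(tuples):
--     if tuples == []:
--         return
--     pointalist = []
--     pointblist = []
--     pointalist += (x[0] for x in tuples)
--     pointblist += (x[1] for x in tuples)
--     maxa = max(pointalist)
--     maxb = max(pointblist)
--     return (maxa, maxb)
-- ===== SOURCE B (Python) =====
-- def max_from_2_tuples(tuples):
--     if tuples == []:
--         return
--     maxa, maxb = tuples[0][0], tuples[0][1]
--     for x in tuples[1:]:
--         if x[0] > maxa: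
--             maxa = x[0]
--         if x[1] > maxb:
--             maxb = x[1]
--     return (maxa, maxb)
-- ===== Notes on version B (the rewrite author's own statement) =====
-- stated objective: simpler
-- what changed: Replaces the two intermediate lists and two max() calls with a single pass over the tuples that maintains both running maxima at once.
import Mathlib
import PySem

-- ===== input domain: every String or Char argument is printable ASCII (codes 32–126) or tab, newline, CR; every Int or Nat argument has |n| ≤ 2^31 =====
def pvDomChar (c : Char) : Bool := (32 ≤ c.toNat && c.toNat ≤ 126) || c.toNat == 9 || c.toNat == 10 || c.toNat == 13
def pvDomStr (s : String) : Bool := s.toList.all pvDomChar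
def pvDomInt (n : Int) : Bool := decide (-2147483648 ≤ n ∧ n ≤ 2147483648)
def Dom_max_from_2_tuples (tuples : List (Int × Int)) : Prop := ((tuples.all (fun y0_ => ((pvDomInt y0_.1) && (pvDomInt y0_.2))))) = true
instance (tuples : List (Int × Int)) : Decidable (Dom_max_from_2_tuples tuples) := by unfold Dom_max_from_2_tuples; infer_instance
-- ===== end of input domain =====

-- B replaces A's two intermediate lists and two max() passes with one single pass
-- keeping both running maxima (objective: simpler).

-- ===== PORT A =====
-- A: guard on [], build the list of first components and the list of second
-- components, then take max() of each (max([]) would raise, but the lists are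
-- nonempty under the guard; the unreachable raise is the `none` fallthrough).
def max_from_2_tuples (tuples : List (Int × Int)) : Option (Int × Int) :=
  if tuples = [] then none
  else
    let pointalist : List Int := [] ++ tuples.map (fun x => x.1)
    let pointblist : List Int := [] ++ tuples.map (fun x => x.2)
    match PySem.List.max? pointalist (fun y => y), PySem.List.max? pointblist (fun y => y) with
    | some maxa, some maxb => some (maxa, maxb)
    | _, _ => none

-- ===== PORT B =====
-- B: single pass; start from tuples[0], fold over tuples[1:] updating both maxima.
def max_from_2_tuples_alt (tuples : List (Int × Int)) : Option (Int × Int) :=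
  match tuples with
  | [] => none
  | p :: rest =>
    some (rest.foldl
      (fun (m : Int × Int) x =>
        (if x.1 > m.1 then x.1 else m.1, if x.2 > m.2 then x.2 else m.2))
      (p.1, p.2))

-- ===== PRECONDITION & SPEC =====
def Spec_max_from_2_tuples (tuples : List (Int × Int)) (out : Option (Int × Int)) : Prop := out = max_from_2_tuples_alt tuples
instance (tuples : List (Int × Int)) (out : Option (Int × Int)) : Decidable (Spec_max_from_2_tuples tuples out) := by unfold Spec_max_from_2_tuples; infer_instance

-- ===== CLAIM (what is proved, stated in full; the proofs are below) =====
def Claim_equal_max_from_2_tuples : Prop := ∀ (tuples : List (Int × Int)), Dom_max_from_2_tuples tuples → Spec_max_from_2_tuples tuples (max_from_2_tuples tuples)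

-- ===== LEMMAS AND PROOFS =====

-- B's paired fold computes the running max of the first components and the
-- running max of the second components.
theorem pvFold_pair (rest : List (Int × Int)) (a b : Int) :
    rest.foldl
      (fun (m : Int × Int) x =>
        (if x.1 > m.1 then x.1 else m.1, if x.2 > m.2 then x.2 else m.2))
      (a, b)
    = ((rest.map (fun x => x.1)).foldl max a, (rest.map (fun x => x.2)).foldl max b) := by
  induction rest generalizing a b with
  | nil => rfl
  | cons x t ih =>
    simp only [List.foldl_cons, List.map_cons, ih]
    congr 1 <;> [skip; skip] <;> congr 1 <;>
      simp [max_def] <;> split_ifs <;> omega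

theorem max_from_2_tuples_eq (tuples : List (Int × Int)) :
    max_from_2_tuples tuples = max_from_2_tuples_alt tuples := by
  cases tuples with
  | nil => rfl
  | cons p rest =>
    simp only [max_from_2_tuples, max_from_2_tuples_alt, List.nil_append, List.map_cons,
      PySem.List.max?_id_cons, if_neg (List.cons_ne_nil p rest)]
    rw [pvFold_pair]

-- ===== VERDICT (by name: the statement is the Claim_ definition above) =====
theorem max_from_2_tuples_spec : Claim_equal_max_from_2_tuples := by
  intro tuples _
  exact max_from_2_tuples_eq tuples
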